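-- pv_equiv track=rewrite | github.com/luisola1218/luGEST | lugest_qt/services/bridge_mixins/billing.py | _billing_due_days_from_text
-- ===== SOURCE A (Python) =====
-- def _billing_due_days_from_text(value: str) -> int:
--     digits = "".join(ch if ch.isdigit() else " " for ch in str(value or ""))
--     values = [chunk for chunk in digits.split() if chunk.isdigit()]
--     if not values:
--         return 30
--     try:
--         return max(0, min(365, int(values[0])))
--     except Exception:
--         return 30
-- ===== SOURCE B (Python) =====
-- def _billing_due_days_from_text(value: str) -> int:
--     cur = ""
--     for ch in str(value or ""):
--         if ch.isdigit():
--             cur += ch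
--         elif cur:
--             break
--     if not cur:
--         return 30
--     try:
--         return max(0, min(365, int(cur)))
--     except Exception:
--         return 30
-- ===== Notes on version B (the rewrite author's own statement) =====
-- stated objective: faster
-- what changed: Replaces the replace-join/split/filter pipeline with a single early-terminating character scan that collects only the first digit run.
import Mathlib
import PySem

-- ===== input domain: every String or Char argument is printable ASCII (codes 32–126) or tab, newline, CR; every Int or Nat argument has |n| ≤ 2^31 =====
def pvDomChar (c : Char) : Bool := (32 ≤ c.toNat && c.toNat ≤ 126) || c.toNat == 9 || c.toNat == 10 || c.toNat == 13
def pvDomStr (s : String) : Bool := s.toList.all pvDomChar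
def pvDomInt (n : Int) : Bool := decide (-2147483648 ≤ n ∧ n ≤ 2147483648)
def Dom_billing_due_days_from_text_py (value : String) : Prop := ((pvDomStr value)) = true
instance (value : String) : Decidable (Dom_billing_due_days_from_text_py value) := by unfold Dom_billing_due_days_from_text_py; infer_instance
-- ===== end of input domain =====

-- B replaces A's replace/split/filter pipeline by one early-terminating scan for the first digit run (objective: simpler).

-- ===== PORT A =====
def billing_due_days_from_text_py (value : String) : Int :=
  -- digits = "".join(ch if ch.isdigit() else " " for ch in str(value or ""))
  let digits : List Char := value.toList.map (fun ch => if PySem.Chars.isdigit ch then ch else ' ')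
  -- values = [chunk for chunk in digits.split() if chunk.isdigit()]
  let values : List (List Char) := (PySem.Chars.split₀ digits).filter PySem.Chars.strIsdigit
  match values with
  | [] => 30
  | v :: _ =>
    -- try: return max(0, min(365, int(values[0]))) except Exception: return 30
    match PySem.Int.ofChars? v with
    | some n => max 0 (min 365 n)
    | none => 30

-- ===== PORT B =====
-- the scan loop: cur grows while digits are seen; a non-digit after a non-empty cur breaks
def pvBLoop (cur : List Char) : List Char → List Char
  | [] => cur
  | c :: rest =>
    if PySem.Chars.isdigit c then pvBLoop (cur ++ [c]) rest
    else if cur.isEmpty then pvBLoop cur rest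
    else cur

def billing_due_days_from_text_py_alt (value : String) : Int :=
  let cur := pvBLoop [] value.toList
  if cur.isEmpty then 30
  else
    match PySem.Int.ofChars? cur with
    | some n => max 0 (min 365 n)
    | none => 30

-- ===== PRECONDITION & SPEC =====
def Spec_billing_due_days_from_text_py (value : String) (out : Int) : Prop := out = billing_due_days_from_text_py_alt value
instance (value : String) (out : Int) : Decidable (Spec_billing_due_days_from_text_py value out) := by unfold Spec_billing_due_days_from_text_py; infer_instance

-- ===== CLAIM =====
def Claim_equal_billing_due_days_from_text_py : Prop := ∀ (value : String), Dom_billing_due_days_from_text_py value → Spec_billing_due_days_from_text_py value (billing_due_days_from_text_py value)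

-- ===== LEMMAS AND PROOFS =====

-- the digit runs of cs, given the (reversed) run cur collected so far
def pvRunsAux : List Char → List Char → List (List Char)
  | [], cur => if cur.isEmpty then [] else [cur.reverse]
  | c :: rest, cur =>
    if PySem.Chars.isdigit c then pvRunsAux rest (c :: cur)
    else if cur.isEmpty then pvRunsAux rest []
    else cur.reverse :: pvRunsAux rest []

lemma pv_isspace_if (c : Char) :
    PySem.Chars.isspace (if PySem.Chars.isdigit c then c else ' ') = !PySem.Chars.isdigit c := by
  by_cases h : PySem.Chars.isdigit c = true
  · simp only [h, if_pos, Bool.not_true]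
    simp only [PySem.Chars.isdigit, Bool.and_eq_true, decide_eq_true_eq] at h
    have a1 : 48 ≤ c.toNat := by exact_mod_cast h.1
    have a2 : c.toNat ≤ 57 := by exact_mod_cast h.2
    simp [PySem.Chars.isspace]
    omega
  · simp only [Bool.not_eq_true] at h
    simp [h]
    decide

lemma pv_strIsdigit_rev (cur : List Char) (hne : cur.isEmpty = false)
    (hall : ∀ x ∈ cur, PySem.Chars.isdigit x = true) :
    PySem.Chars.strIsdigit cur.reverse = true := by
  simp only [PySem.Chars.strIsdigit, List.isEmpty_reverse, hne, Bool.not_false, Bool.true_and,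
    List.all_eq_true, List.mem_reverse]
  exact hall

lemma pv_split₀_go_runs (cs : List Char) :
    ∀ cur acc, PySem.Chars.split₀.go (cs.map (fun ch => if PySem.Chars.isdigit ch then ch else ' ')) cur acc
      = acc.reverse ++ pvRunsAux cs cur := by
  induction cs with
  | nil =>
    intro cur acc
    simp only [List.map_nil, PySem.Chars.split₀.go, pvRunsAux]
    by_cases h : cur.isEmpty <;> simp [h]
  | cons c rest ih =>
    intro cur acc
    simp only [List.map_cons, PySem.Chars.split₀.go, pv_isspace_if, pvRunsAux]
    by_cases hd : PySem.Chars.isdigit c = true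
    · simp [hd, ih]
    · simp only [Bool.not_eq_true] at hd
      by_cases he : cur.isEmpty <;> simp [hd, he, ih]

lemma pv_runs_chunks (cs : List Char) :
    ∀ cur, (∀ x ∈ cur, PySem.Chars.isdigit x = true) →
      ∀ v ∈ pvRunsAux cs cur, PySem.Chars.strIsdigit v = true := by
  induction cs with
  | nil =>
    intro cur hcur v hv
    simp only [pvRunsAux] at hv
    by_cases he : cur.isEmpty
    · simp [he] at hv
    · simp only [Bool.not_eq_true] at he
      simp only [he, Bool.false_eq_true, if_false, List.mem_singleton] at hv
      subst hv
      exact pv_strIsdigit_rev cur he hcur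
  | cons c rest ih =>
    intro cur hcur v hv
    simp only [pvRunsAux] at hv
    by_cases hd : PySem.Chars.isdigit c = true
    · simp only [hd, if_pos] at hv
      refine ih (c :: cur) ?_ v hv
      intro x hx
      rcases List.mem_cons.mp hx with h | h
      · exact h ▸ hd
      · exact hcur x h
    · simp only [Bool.not_eq_true] at hd
      simp only [hd, Bool.false_eq_true, if_false] at hv
      by_cases he : cur.isEmpty
      · simp only [he, if_true] at hv
        exact ih [] (by simp) v hv
      · simp only [Bool.not_eq_true] at he
        simp only [he, Bool.false_eq_true, if_false, List.mem_cons] at hv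
        rcases hv with hv | hv
        · exact hv ▸ pv_strIsdigit_rev cur he hcur
        · exact ih [] (by simp) v hv

lemma pv_bloop_head (cs : List Char) :
    ∀ cur, pvBLoop cur cs = (pvRunsAux cs cur.reverse).headD [] := by
  induction cs with
  | nil =>
    intro cur
    simp only [pvBLoop, pvRunsAux, List.isEmpty_reverse]
    by_cases he : cur.isEmpty
    · simp [List.isEmpty_iff.mp he]
    · simp [he]
  | cons c rest ih =>
    intro cur
    simp only [pvBLoop, pvRunsAux]
    by_cases hd : PySem.Chars.isdigit c = true
    · simp only [hd, if_pos]
      rw [ih (cur ++ [c])]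
      simp
    · simp only [Bool.not_eq_true] at hd
      simp only [hd, Bool.false_eq_true, if_false, List.isEmpty_reverse]
      by_cases he : cur.isEmpty
      · simp only [he, if_true]
        rw [ih cur, List.isEmpty_iff.mp he]
        simp
      · simp only [Bool.not_eq_true] at he
        simp only [he, Bool.false_eq_true, if_false, List.headD_cons, List.reverse_reverse]

-- ===== VERDICT =====
theorem billing_due_days_from_text_py_spec : Claim_equal_billing_due_days_from_text_py := by
  intro value _
  unfold Spec_billing_due_days_from_text_py billing_due_days_from_text_py billing_due_days_from_text_py_alt
  have hruns := pv_split₀_go_runs value.toList [] []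
  simp only [List.reverse_nil, List.nil_append] at hruns
  have hfilter : (PySem.Chars.split₀ (value.toList.map (fun ch => if PySem.Chars.isdigit ch then ch else ' '))).filter PySem.Chars.strIsdigit = pvRunsAux value.toList [] := by
    rw [PySem.Chars.split₀, hruns]
    exact List.filter_eq_self.mpr (pv_runs_chunks value.toList [] (by simp))
  simp only [pv_bloop_head, List.reverse_nil, hfilter]
  cases hr : pvRunsAux value.toList [] with
  | nil => simp
  | cons v vs =>
    have hv : PySem.Chars.strIsdigit v = true :=
      pv_runs_chunks value.toList [] (by simp) v (by rw [hr]; exact List.mem_cons_self)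
    have hne : v.isEmpty = false := by
      simp only [PySem.Chars.strIsdigit, Bool.and_eq_true, Bool.not_eq_true'] at hv
      exact hv.1
    simp [hne]
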